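-- pv_equiv track=rewrite | github.com/KarlJohnsonnn/MeteoDataComparison | modules/NetCDF_Mod.py | get_time_boundary
-- ===== SOURCE A (Python) =====
-- def get_time_boundary(Array, t_int):
--     i = 0
--     t_min = 0
--     t_max = None
--     for zeit in Array:
--         if t_int[0] <= zeit <= t_int[1]: t_min = i
--         if t_int[2] <= zeit <= t_int[3]: t_max = i
--         i += 1
--
--     return t_min, t_max
-- ===== SOURCE B (Python) =====
-- def get_time_boundary(Array, t_int):
--     lo1, hi1, lo2, hi2 = t_int[0], t_int[1], t_int[2], t_int[3]
--
--     def last_index_in(lo, hi, default):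
--         # walk backwards, stop at the first (i.e. last) element inside [lo, hi]
--         for j in range(len(Array) - 1, -1, -1):
--             if lo <= Array[j] <= hi:
--                 return j
--         return default
--
--     return last_index_in(lo1, hi1, 0), last_index_in(lo2, hi2, None)
-- ===== Notes on version B (the rewrite author's own statement) =====
-- stated objective: alternative
-- what changed: B reads the four interval boundaries once and performs two backward scans that stop at the first (i.e. last) matching index, instead of A's single forward scan that keeps overwriting three counters over the whole array.
-- outside the precondition, e.g. on get_time_boundary([], []): A returns (0, None), B raises IndexError
import Mathlib
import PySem

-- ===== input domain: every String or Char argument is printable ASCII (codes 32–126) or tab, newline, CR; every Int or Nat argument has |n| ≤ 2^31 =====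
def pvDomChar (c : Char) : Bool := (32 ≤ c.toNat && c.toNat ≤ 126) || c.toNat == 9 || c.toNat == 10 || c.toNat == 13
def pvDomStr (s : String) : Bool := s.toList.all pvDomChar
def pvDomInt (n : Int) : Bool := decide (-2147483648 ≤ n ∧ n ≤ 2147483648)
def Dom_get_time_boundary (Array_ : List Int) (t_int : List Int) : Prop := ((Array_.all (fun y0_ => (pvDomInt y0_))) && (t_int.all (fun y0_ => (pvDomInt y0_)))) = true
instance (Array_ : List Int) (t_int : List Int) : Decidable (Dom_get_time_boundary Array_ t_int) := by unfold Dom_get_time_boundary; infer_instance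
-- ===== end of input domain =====

-- B reads the four boundaries once and scans backwards with early exit at the last match,
-- instead of A's forward scan overwriting counters; objective: alternative (same worst-case cost).


-- ===== PORT A =====
-- A's loop body: state (i, t_min, t_max); t_int[k] valid under Pre_ (getD value unreachable there)
def pvStepA (t_int : List Int) (st : Int × Int × Option Int) (zeit : Int) : Int × Int × Option Int :=
  let g : Int → Int := fun k => (PySem.List.pyGet? t_int k).getD 0
  let i := st.1
  let tmin := if g 0 ≤ zeit ∧ zeit ≤ g 1 then i else st.2.1
  let tmax := if g 2 ≤ zeit ∧ zeit ≤ g 3 then some i else st.2.2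
  (i + 1, tmin, tmax)

def get_time_boundary (Array_ : List Int) (t_int : List Int) : Int × Option Int :=
  let st := Array_.foldl (pvStepA t_int) (0, 0, none)
  (st.2.1, st.2.2)

-- ===== PORT B =====
-- backward scan: first match in the reversed list, carrying the running index j downwards
def pvLastIdx (rev : List Int) (j : Int) (lo hi : Int) : Option Int :=
  match rev with
  | [] => none
  | x :: rest => if lo ≤ x ∧ x ≤ hi then some j else pvLastIdx rest (j - 1) lo hi

def get_time_boundary_alt (Array_ : List Int) (t_int : List Int) : Int × Option Int :=
  let g : Int → Int := fun k => (PySem.List.pyGet? t_int k).getD 0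
  let rev := Array_.reverse
  let j : Int := (Array_.length : Int) - 1
  ((pvLastIdx rev j (g 0) (g 1)).getD 0, pvLastIdx rev j (g 2) (g 3))

-- ===== PRECONDITION & SPEC =====
-- Pre_ excludes t_int with fewer than 4 entries: there A raises IndexError whenever Array_ is
-- nonempty, and on empty Array_ A's (0, None) never inspects t_int while B reads the boundaries up front.
def Pre_get_time_boundary (Array_ : List Int) (t_int : List Int) : Prop := 4 ≤ t_int.length
instance (Array_ : List Int) (t_int : List Int) : Decidable (Pre_get_time_boundary Array_ t_int) := by unfold Pre_get_time_boundary; infer_instance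
def pvWitness_get_time_boundary : List Int × List Int := ([5, 12], [0, 10, 0, 10])

def Spec_get_time_boundary (Array_ : List Int) (t_int : List Int) (out : Int × Option Int) : Prop := out = get_time_boundary_alt Array_ t_int
instance (Array_ : List Int) (t_int : List Int) (out : Int × Option Int) : Decidable (Spec_get_time_boundary Array_ t_int out) := by unfold Spec_get_time_boundary; infer_instance

-- ===== CLAIM (what is proved, stated in full; the proofs are below) =====
def Claim_equal_get_time_boundary : Prop := ∀ (Array_ : List Int) (t_int : List Int), Dom_get_time_boundary Array_ t_int → Pre_get_time_boundary Array_ t_int → Spec_get_time_boundary Array_ t_int (get_time_boundary Array_ t_int)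

-- ===== LEMMAS AND PROOFS =====
theorem pvLoopA_main (t_int : List Int) (xs : List Int) :
    xs.foldl (pvStepA t_int) (0, 0, none) =
      ((xs.length : Int),
        (pvLastIdx xs.reverse ((xs.length : Int) - 1)
            ((PySem.List.pyGet? t_int 0).getD 0) ((PySem.List.pyGet? t_int 1).getD 0)).getD 0,
        pvLastIdx xs.reverse ((xs.length : Int) - 1)
            ((PySem.List.pyGet? t_int 2).getD 0) ((PySem.List.pyGet? t_int 3).getD 0)) := by
  induction xs using List.reverseRecOn with
  | nil => simp [pvLastIdx]
  | append_singleton xs z ih =>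
      rw [List.foldl_append, ih]
      simp only [List.foldl_cons, List.foldl_nil, List.reverse_append, List.reverse_cons,
        List.reverse_nil, List.nil_append, List.cons_append, List.length_append,
        List.length_cons, List.length_nil, pvLastIdx, pvStepA]
      push_cast
      split_ifs <;> simp

-- ===== VERDICT (by name: the statement is the Claim_ definition above) =====
theorem get_time_boundary_spec : Claim_equal_get_time_boundary := by
  intro Array_ t_int _ _
  unfold Spec_get_time_boundary get_time_boundary get_time_boundary_alt
  simp only [pvLoopA_main]
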